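-- pv_equiv track=rewrite | github.com/aicodeautomation/bb-ios-automation | block_detection.py | shape_to_matrix
-- ===== SOURCE A (Python) =====
-- def shape_to_matrix(shape):
--     xs = [x for x, y in shape]
--     ys = [y for x, y in shape]
--     min_x, min_y = min(xs), min(ys)
--     width = max(xs) - min_x + 1
--     height = max(ys) - min_y + 1
--     mat = [[0]*width for _ in range(height)]
--     for x, y in shape:
--         mat[y - min_y][x - min_x] = 1
--     return min_x, mat
-- ===== SOURCE B (Python) =====
-- def shape_to_matrix(shape):
--     # Different decomposition: one pass computes all four bounds, and the
--     # matrix is built directly by set membership instead of zero-fill + mutate.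
--     (min_x, min_y) = (max_x, max_y) = shape[0]
--     for x, y in shape:
--         if x < min_x:
--             min_x = x
--         if y < min_y:
--             min_y = y
--         if x > max_x:
--             max_x = x
--         if y > max_y:
--             max_y = y
--     pts = set(shape)
--     mat = [[1 if (x, y) in pts else 0 for x in range(min_x, max_x + 1)]
--            for y in range(min_y, max_y + 1)]
--     return min_x, mat
-- ===== Notes on version B (the rewrite author's own statement) =====
-- stated objective: alternative
-- what changed: B computes all four bounds in a single pass and builds the matrix directly by set-membership comprehensions instead of allocating a zero matrix and mutating cells in a fill loop; Pre_ excludes only the empty list, on which A raises ValueError (min of empty sequence).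
import Mathlib
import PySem

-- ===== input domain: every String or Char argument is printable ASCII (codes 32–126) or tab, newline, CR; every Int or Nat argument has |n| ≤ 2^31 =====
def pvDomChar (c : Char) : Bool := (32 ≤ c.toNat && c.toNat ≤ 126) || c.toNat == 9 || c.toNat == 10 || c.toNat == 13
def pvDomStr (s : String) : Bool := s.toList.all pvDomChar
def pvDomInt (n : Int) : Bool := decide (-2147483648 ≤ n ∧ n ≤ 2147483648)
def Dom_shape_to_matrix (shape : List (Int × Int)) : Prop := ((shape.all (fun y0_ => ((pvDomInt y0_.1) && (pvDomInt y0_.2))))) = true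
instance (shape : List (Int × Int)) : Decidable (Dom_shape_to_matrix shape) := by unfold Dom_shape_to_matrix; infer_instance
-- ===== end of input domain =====

-- B changes the decomposition: one pass for the four bounds and a membership
-- comprehension instead of zero-fill + in-place mutation (objective: alternative).

-- ===== PORT A =====
-- mat[y - min_y][x - min_x] = 1 (indices are always nonnegative and in range here,
-- so pyGetD/pySetD are exact)
def pvFill (min_x min_y : Int) (m : List (List Int)) (p : Int × Int) : List (List Int) :=
  PySem.List.pySetD m (p.2 - min_y)
    (PySem.List.pySetD (PySem.List.pyGetD m (p.2 - min_y) []) (p.1 - min_x) 1)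

def shape_to_matrix (shape : List (Int × Int)) : Int × List (List Int) :=
  let xs := shape.map (fun p => p.1)
  let ys := shape.map (fun p => p.2)
  match PySem.List.min? xs (fun v => v), PySem.List.min? ys (fun v => v),
        PySem.List.max? xs (fun v => v), PySem.List.max? ys (fun v => v) with
  | some min_x, some min_y, some max_x, some max_y =>
      let width := max_x - min_x + 1
      let height := max_y - min_y + 1
      let mat : List (List Int) :=
        (PySem.List.pyRange 0 height 1).map (fun _ => PySem.List.pyRepeat [(0 : Int)] width)
      let mat := shape.foldl (pvFill min_x min_y) mat
      (min_x, mat)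
  | _, _, _, _ => (0, [])   -- unreachable: shape = [] raises ValueError (outside Pre_)

-- ===== PORT B =====
def pvUpd (b : (Int × Int) × (Int × Int)) (p : Int × Int) : (Int × Int) × (Int × Int) :=
  ((if p.1 < b.1.1 then p.1 else b.1.1, if p.2 < b.1.2 then p.2 else b.1.2),
   (if p.1 > b.2.1 then p.1 else b.2.1, if p.2 > b.2.2 then p.2 else b.2.2))

def shape_to_matrix_alt (shape : List (Int × Int)) : Int × List (List Int) :=
  match shape with
  | [] => (0, [])   -- unreachable: shape[0] raises IndexError (outside Pre_)
  | p0 :: _ =>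
      let b := shape.foldl pvUpd (p0, p0)
      let pts : PySem.Set (Int × Int) := PySem.Set.ofList shape
      let mat := (PySem.List.pyRange b.1.2 (b.2.2 + 1) 1).map (fun y =>
        (PySem.List.pyRange b.1.1 (b.2.1 + 1) 1).map (fun x =>
          if PySem.Set.contains pts (x, y) then (1 : Int) else 0))
      (b.1.1, mat)

-- ===== PRECONDITION & SPEC =====
-- Pre_ excludes only the empty list, on which A raises ValueError (min of empty sequence).
def Pre_shape_to_matrix (shape : List (Int × Int)) : Prop := shape ≠ []
instance (shape : List (Int × Int)) : Decidable (Pre_shape_to_matrix shape) := by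
  unfold Pre_shape_to_matrix; infer_instance

def pvWitness_shape_to_matrix : (List (Int × Int)) := [(0, 0), (2, 1)]

def Spec_shape_to_matrix (shape : List (Int × Int)) (out : Int × List (List Int)) : Prop := out = shape_to_matrix_alt shape
instance (shape : List (Int × Int)) (out : Int × List (List Int)) : Decidable (Spec_shape_to_matrix shape out) := by unfold Spec_shape_to_matrix; infer_instance

-- ===== CLAIM (what is proved, stated in full; the proofs are below) =====
def Claim_equal_shape_to_matrix : Prop := ∀ (shape : List (Int × Int)), Dom_shape_to_matrix shape → Pre_shape_to_matrix shape → Spec_shape_to_matrix shape (shape_to_matrix shape)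

-- ===== LEMMAS AND PROOFS =====

-- B's one-pass fold computes the four componentwise running min/max values.
theorem pvUpd_foldl (t : List (Int × Int)) :
    ∀ (a b c d : Int), t.foldl pvUpd ((a, b), (c, d)) =
      (((t.map (fun p => p.1)).foldl min a, (t.map (fun p => p.2)).foldl min b),
       ((t.map (fun p => p.1)).foldl max c, (t.map (fun p => p.2)).foldl max d)) := by
  induction t with
  | nil => intro a b c d; rfl
  | cons p t ih =>
      intro a b c d
      simp only [List.foldl_cons, List.map_cons]
      rw [show pvUpd ((a, b), (c, d)) p =
        ((min a p.1, min b p.2), (max c p.1, max d p.2)) by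
          simp only [pvUpd, min_def, max_def]; congr 1 <;> congr 1 <;> split_ifs <;> omega]
      exact ih _ _ _ _

theorem pvFoldl_min_le_init (t : List Int) (a : Int) : t.foldl min a ≤ a := by
  induction t generalizing a with
  | nil => simp
  | cons x t ih => exact le_trans (ih (min a x)) (min_le_left a x)

theorem pvFoldl_min_le_mem (t : List Int) (a x : Int) (hx : x ∈ t) : t.foldl min a ≤ x := by
  induction t generalizing a with
  | nil => cases hx
  | cons y t ih =>
      rcases List.mem_cons.mp hx with h | h
      · subst h; exact le_trans (pvFoldl_min_le_init t (min a x)) (min_le_right a x)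
      · exact ih _ h

theorem pvInit_le_foldl_max (t : List Int) (a : Int) : a ≤ t.foldl max a := by
  induction t generalizing a with
  | nil => simp
  | cons x t ih => exact le_trans (le_max_left a x) (ih (max a x))

theorem pvMem_le_foldl_max (t : List Int) (a x : Int) (hx : x ∈ t) : x ≤ t.foldl max a := by
  induction t generalizing a with
  | nil => cases hx
  | cons y t ih =>
      rcases List.mem_cons.mp hx with h | h
      · subst h; exact le_trans (le_max_right a x) (pvInit_le_foldl_max t (max a x))
      · exact ih _ h

-- Invariant for A's fill loop: entry (i,j) becomes 1 exactly when (mnx+j, mny+i) ∈ l.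
theorem pvFill_spec (mnx mny : Int) (W : Nat) (l : List (Int × Int)) :
    ∀ (m : List (List Int)),
    (∀ r ∈ m, r.length = W) →
    (∀ p ∈ l, mnx ≤ p.1 ∧ mny ≤ p.2 ∧ (p.2 - mny).toNat < m.length ∧ (p.1 - mnx).toNat < W) →
    (l.foldl (pvFill mnx mny) m).length = m.length ∧
    (∀ r ∈ l.foldl (pvFill mnx mny) m, r.length = W) ∧
    (∀ i j : Nat, i < m.length → j < W →
      ((l.foldl (pvFill mnx mny) m).getD i []).getD j 0 =
        if (mnx + (j : Int), mny + (i : Int)) ∈ l then 1 else (m.getD i []).getD j 0) := by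
  induction l with
  | nil => intro m hr _; refine ⟨rfl, hr, ?_⟩; intro i j _ _; simp
  | cons p t ih =>
      intro m hr hb
      obtain ⟨hp1, hp2, hpi, hpj⟩ := hb p (List.mem_cons_self ..)
      have hi0 : (0 : Int) ≤ p.2 - mny := by omega
      have hj0 : (0 : Int) ≤ p.1 - mnx := by omega
      set i₀ : Nat := (p.2 - mny).toNat with hi₀
      set j₀ : Nat := (p.1 - mnx).toNat with hj₀
      have hrow : PySem.List.pyGetD m (p.2 - mny) [] = m.getD i₀ [] := by
        rw [show (p.2 - mny) = ((i₀ : Nat) : Int) by omega, PySem.List.pyGetD_natCast]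
      have hrowlen : (m.getD i₀ []).length = W := by
        have h1 : m.getD i₀ [] = m[i₀]'hpi := by
          rw [List.getD_eq_getElem?_getD, List.getElem?_eq_getElem hpi]; rfl
        rw [h1]; exact hr _ (List.getElem_mem hpi)
      have hm1 : List.foldl (pvFill mnx mny) m (p :: t) =
          t.foldl (pvFill mnx mny) (m.set i₀ ((m.getD i₀ []).set j₀ 1)) := by
        simp only [List.foldl_cons]
        congr 1
        unfold pvFill
        rw [hrow,
          show (p.2 - mny) = ((i₀ : Nat) : Int) by omega,
          show (p.1 - mnx) = ((j₀ : Nat) : Int) by omega,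
          PySem.List.pySetD_natCast, PySem.List.pySetD_natCast]
      set m1 := m.set i₀ ((m.getD i₀ []).set j₀ 1) with hm1def
      have hlen1 : m1.length = m.length := by simp [hm1def]
      have hr1 : ∀ r ∈ m1, r.length = W := by
        intro r hrm
        rcases List.mem_or_eq_of_mem_set hrm with h | h
        · exact hr _ h
        · subst h; rw [List.length_set]; exact hrowlen
      have hb1 : ∀ q ∈ t, mnx ≤ q.1 ∧ mny ≤ q.2 ∧ (q.2 - mny).toNat < m1.length ∧
          (q.1 - mnx).toNat < W := by
        intro q hq
        have := hb q (List.mem_cons_of_mem _ hq)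
        omega
      obtain ⟨ihl, ihr, ihe⟩ := ih m1 hr1 hb1
      refine ⟨by rw [hm1]; omega, by rw [hm1]; exact ihr, ?_⟩
      intro i j hi hj
      rw [hm1, ihe i j (by omega) hj]
      have hentry : (m1.getD i []).getD j 0 =
          if i = i₀ ∧ j = j₀ then 1 else (m.getD i []).getD j 0 := by
        by_cases hii : i = i₀
        · have h1 : m1.getD i [] = (m.getD i₀ []).set j₀ 1 := by
            rw [hm1def, List.getD_eq_getElem?_getD, List.getElem?_set, if_pos hii.symm,
              if_pos hpi]
            rfl
          rw [h1, hii]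
          by_cases hjj : j = j₀
          · rw [if_pos ⟨rfl, hjj⟩, hjj, List.getD_eq_getElem?_getD, List.getElem?_set, if_pos rfl,
              if_pos (by rw [hrowlen]; exact hpj)]
            rfl
          · rw [if_neg (by tauto), List.getD_eq_getElem?_getD, List.getElem?_set,
              if_neg (by omega), ← List.getD_eq_getElem?_getD]
        · have h1 : m1.getD i [] = m.getD i [] := by
            rw [hm1def, List.getD_eq_getElem?_getD, List.getElem?_set, if_neg (by omega),
              ← List.getD_eq_getElem?_getD]
          rw [h1, if_neg (by tauto)]
      rw [hentry]
      have hmemp : ((mnx + (j : Int), mny + (i : Int)) = p) ↔ (i = i₀ ∧ j = j₀) := by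
        constructor
        · intro h
          have h1 : mnx + (j : Int) = p.1 := by rw [← h]
          have h2 : mny + (i : Int) = p.2 := by rw [← h]
          omega
        · rintro ⟨h1, h2⟩
          have : p = (p.1, p.2) := rfl
          rw [this]
          congr 1 <;> omega
      by_cases hmt : (mnx + (j : Int), mny + (i : Int)) ∈ t
      · rw [if_pos hmt, if_pos (List.mem_cons_of_mem _ hmt)]
      · rw [if_neg hmt]
        by_cases heq : i = i₀ ∧ j = j₀
        · rw [if_pos heq, if_pos (List.mem_cons.mpr (Or.inl (hmemp.mpr heq)))]
        · rw [if_neg heq, if_neg (by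
            intro h
            rcases List.mem_cons.mp h with h | h
            · exact heq (hmemp.mp h)
            · exact hmt h)]

-- membership in set(shape) is membership in shape
theorem pvContains_ofList (shape : List (Int × Int)) (q : Int × Int) :
    PySem.Set.contains (PySem.Set.ofList shape) q = decide (q ∈ shape) := by
  simp [PySem.Set.contains, PySem.Set.mem_ofList]

-- the whole equivalence on a nonempty list
theorem pv_main (p0 : Int × Int) (rest : List (Int × Int)) :
    shape_to_matrix (p0 :: rest) = shape_to_matrix_alt (p0 :: rest) := by
  have hA : shape_to_matrix (p0 :: rest) =
      ((rest.map (fun p => p.1)).foldl min p0.1,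
        (p0 :: rest).foldl
          (pvFill ((rest.map (fun p => p.1)).foldl min p0.1)
            ((rest.map (fun p => p.2)).foldl min p0.2))
          ((PySem.List.pyRange 0
              ((rest.map (fun p => p.2)).foldl max p0.2 -
                (rest.map (fun p => p.2)).foldl min p0.2 + 1) 1).map
            (fun _ => PySem.List.pyRepeat [(0 : Int)]
              ((rest.map (fun p => p.1)).foldl max p0.1 -
                (rest.map (fun p => p.1)).foldl min p0.1 + 1)))) := by
    simp only [shape_to_matrix, List.map_cons, PySem.List.min?_id_cons,
      PySem.List.max?_id_cons]
  have hupd : (p0 :: rest).foldl pvUpd (p0, p0) =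
      (((rest.map (fun p => p.1)).foldl min p0.1, (rest.map (fun p => p.2)).foldl min p0.2),
       ((rest.map (fun p => p.1)).foldl max p0.1, (rest.map (fun p => p.2)).foldl max p0.2)) := by
    rw [show (p0, p0) = ((p0.1, p0.2), (p0.1, p0.2)) from rfl, pvUpd_foldl]
    simp
  have hB : shape_to_matrix_alt (p0 :: rest) =
      ((rest.map (fun p => p.1)).foldl min p0.1,
        (PySem.List.pyRange ((rest.map (fun p => p.2)).foldl min p0.2)
            ((rest.map (fun p => p.2)).foldl max p0.2 + 1) 1).map (fun y =>
          (PySem.List.pyRange ((rest.map (fun p => p.1)).foldl min p0.1)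
              ((rest.map (fun p => p.1)).foldl max p0.1 + 1) 1).map (fun x =>
            if PySem.Set.contains (PySem.Set.ofList (p0 :: rest)) (x, y) then (1 : Int)
            else 0))) := by
    simp only [shape_to_matrix_alt, hupd]
  rw [hA, hB]
  set mnx := (rest.map (fun p => p.1)).foldl min p0.1 with hmnx
  set mny := (rest.map (fun p => p.2)).foldl min p0.2 with hmny
  set mxx := (rest.map (fun p => p.1)).foldl max p0.1 with hmxx
  set mxy := (rest.map (fun p => p.2)).foldl max p0.2 with hmxy
  have hbnd : ∀ p ∈ p0 :: rest, mnx ≤ p.1 ∧ mny ≤ p.2 ∧ p.1 ≤ mxx ∧ p.2 ≤ mxy := by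
    intro p hp
    rcases List.mem_cons.mp hp with h | h
    · subst h
      exact ⟨pvFoldl_min_le_init _ _, pvFoldl_min_le_init _ _,
        pvInit_le_foldl_max _ _, pvInit_le_foldl_max _ _⟩
    · exact ⟨pvFoldl_min_le_mem _ _ _ (List.mem_map_of_mem h),
        pvFoldl_min_le_mem _ _ _ (List.mem_map_of_mem h),
        pvMem_le_foldl_max _ _ _ (List.mem_map_of_mem h),
        pvMem_le_foldl_max _ _ _ (List.mem_map_of_mem h)⟩
  set W : Nat := (mxx - mnx + 1).toNat with hW
  set H : Nat := (mxy - mny + 1).toNat with hH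
  set init : List (List Int) := (PySem.List.pyRange 0 (mxy - mny + 1) 1).map
    (fun _ => PySem.List.pyRepeat [(0 : Int)] (mxx - mnx + 1)) with hinitdef
  have hinitlen : init.length = H := by
    simp [hinitdef, PySem.List.length_pyRange_one, hH]
  have hinitrow : ∀ r ∈ init, r.length = W := by
    intro r hr
    simp only [hinitdef, List.mem_map] at hr
    obtain ⟨x, _, rfl⟩ := hr
    simp [PySem.List.pyRepeat_singleton, hW]
  have hinit0 : ∀ i j : Nat, ((init.getD i []).getD j 0) = 0 := by
    intro i j
    rw [List.getD_eq_getElem?_getD,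
      show init.getD i [] = init[i]?.getD [] from List.getD_eq_getElem?_getD]
    rcases h : init[i]? with _ | r
    · simp
    · have hr : r ∈ init := List.mem_of_getElem? h
      simp only [hinitdef, List.mem_map] at hr
      obtain ⟨x, _, rfl⟩ := hr
      simp only [Option.getD_some, PySem.List.pyRepeat_singleton,
        List.getElem?_replicate]
      split <;> rfl
  have hboundsW : ∀ p ∈ p0 :: rest,
      mnx ≤ p.1 ∧ mny ≤ p.2 ∧ (p.2 - mny).toNat < init.length ∧ (p.1 - mnx).toNat < W := by
    intro p hp
    obtain ⟨h1, h2, h3, h4⟩ := hbnd p hp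
    refine ⟨h1, h2, ?_, ?_⟩
    · rw [hinitlen]; omega
    · omega
  obtain ⟨hAl, hArw, hAe⟩ := pvFill_spec mnx mny W (p0 :: rest) init hinitrow hboundsW
  refine Prod.ext rfl ?_
  dsimp only
  apply List.ext_getElem
  · rw [hAl, hinitlen]
    simp only [List.length_map, PySem.List.length_pyRange_one, hH]
    omega
  intro i h1 h2
  have hiH : i < H := by rw [hAl, hinitlen] at h1; exact h1
  rw [List.getElem_map, PySem.List.getElem_pyRange_one]
  apply List.ext_getElem
  · rw [hArw _ (List.getElem_mem h1)]
    simp only [List.length_map, PySem.List.length_pyRange_one, hW]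
    omega
  intro j hj1 hj2
  have hjW : j < W := by rw [hArw _ (List.getElem_mem h1)] at hj1; exact hj1
  rw [List.getElem_map, PySem.List.getElem_pyRange_one]
  have hAg : (((p0 :: rest).foldl (pvFill mnx mny) init)[i]'h1)[j]'hj1 =
      (((p0 :: rest).foldl (pvFill mnx mny) init).getD i []).getD j 0 := by
    have e1 : ((p0 :: rest).foldl (pvFill mnx mny) init).getD i [] =
        ((p0 :: rest).foldl (pvFill mnx mny) init)[i]'h1 := by
      rw [List.getD_eq_getElem?_getD, List.getElem?_eq_getElem h1]; rfl
    rw [e1, List.getD_eq_getElem?_getD, List.getElem?_eq_getElem hj1]; rfl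
  rw [hAg, hAe i j (by rw [hinitlen]; exact hiH) hjW, hinit0, pvContains_ofList]
  by_cases hm : (mnx + (j : Int), mny + (i : Int)) ∈ p0 :: rest <;> simp [hm]

-- ===== VERDICT (by name: the statement is the Claim_ definition above) =====
theorem shape_to_matrix_spec : Claim_equal_shape_to_matrix := by
  intro shape _ hpre
  unfold Spec_shape_to_matrix
  match shape, hpre with
  | p0 :: rest, _ => exact pv_main p0 rest
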